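-- pv_equiv track=rewrite | github.com/AlekseySapi/python | games/sapi_quiz.py | caesar_plus_shift
-- ===== SOURCE A (Python) =====
-- def caesar_plus_shift(text, shift, alph):
--     result = []
--     i = 0
--     for char in text:
--         if char in alph:
--             idx = alph.index(char)
--             new_idx = idx + shift + i
--             i += 1 + shift % 9
--             result.append(alph[new_idx % len(alph)])
--         else:
--             result.append(char)
--     return ''.join(result)
-- ===== SOURCE B (Python) =====
-- def caesar_plus_shift(text, shift, alph):
--     # Pass 0: first-occurrence index of every alphabet character.
--     pos = {}
--     for i, c in enumerate(alph):
--         if c not in pos: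
--             pos[c] = i
--     # Pass 1: parallel table: None for passthrough chars, else (base index, prefix-count k).
--     table = []
--     k = 0
--     for ch in text:
--         ent = pos.get(ch)
--         if ent is None:
--             table.append(None)
--         else:
--             table.append((ent, k))
--             k += 1
--     # Pass 2: shape the output from the table with the closed-form offset k*(1 + shift % 9).
--     step = 1 + shift % 9
--     n = len(alph)
--     out = []
--     for ch, ent in zip(text, table):
--         if ent is None:
--             out.append(ch)
--         else:
--             idx, kk = ent
--             out.append(alph[(idx + shift + kk * step) % n])
--     return ''.join(out)
-- ===== Notes on version B (the rewrite author's own statement) =====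
-- stated objective: alternative
-- what changed: Replaces the single running-accumulator loop that calls alph.index per character with three passes: a first-occurrence position dict built once, a parallel table of (base index, prefix-count k), and a shaping pass using the closed-form offset k*(1 + shift % 9); it trades the per-character alph scan for dict construction and an extra pass.
import Mathlib
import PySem

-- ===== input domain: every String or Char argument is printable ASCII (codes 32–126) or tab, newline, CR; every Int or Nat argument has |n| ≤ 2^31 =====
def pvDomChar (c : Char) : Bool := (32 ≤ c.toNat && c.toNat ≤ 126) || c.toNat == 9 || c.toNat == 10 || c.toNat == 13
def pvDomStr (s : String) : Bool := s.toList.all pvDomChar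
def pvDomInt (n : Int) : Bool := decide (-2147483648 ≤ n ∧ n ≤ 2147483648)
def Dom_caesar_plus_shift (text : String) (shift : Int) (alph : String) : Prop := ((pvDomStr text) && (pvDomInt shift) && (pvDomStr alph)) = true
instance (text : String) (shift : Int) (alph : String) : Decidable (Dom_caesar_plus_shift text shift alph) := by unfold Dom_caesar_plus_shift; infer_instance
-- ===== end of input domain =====

-- B replaces A's per-character alph.index scan and running accumulator with a position dict,
-- a parallel (base index, prefix-count) table, and a shaping pass with offset k*(1 + shift % 9)
-- (alternative decomposition; not measured faster).

-- ===== PORT A =====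
-- the for-loop over text with the running offset i, result built front-to-back
def pvAGo (alph : List Char) (shift : Int) : List Char → Int → List Char
  | [], _ => []
  | c :: rest, i =>
    if alph.contains c then
      let idx : Int := (((PySem.List.index? alph c).getD 0 : Nat) : Int)
      let newIdx := idx + shift + i
      (PySem.List.pyGetD alph (PySem.Int.mod newIdx (alph.length : Int)) c)
        :: pvAGo alph shift rest (i + (1 + PySem.Int.mod shift 9))
    else
      c :: pvAGo alph shift rest i

def caesar_plus_shift (text : String) (shift : Int) (alph : String) : String :=
  String.ofList (pvAGo alph.toList shift text.toList 0)

-- ===== PORT B =====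
-- pass 0: first-occurrence position dict
def pvPos (alph : List Char) : PySem.Dict Char Int :=
  (PySem.List.enumerate alph 0).foldl
    (fun d p => if d.contains p.2 then d else d.insert p.2 p.1) PySem.Dict.empty

-- pass 1: parallel table of (base index, prefix-count k)
def pvTable (pos : PySem.Dict Char Int) : List Char → Int → List (Option (Int × Int))
  | [], _ => []
  | c :: rest, k =>
    match pos.get? c with
    | none => none :: pvTable pos rest k
    | some idx => some (idx, k) :: pvTable pos rest (k + 1)

-- pass 2: shape the output from the table
def caesar_plus_shift_alt (text : String) (shift : Int) (alph : String) : String :=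
  let pos := pvPos alph.toList
  let table := pvTable pos text.toList 0
  let step := 1 + PySem.Int.mod shift 9
  let n : Int := (alph.toList.length : Int)
  String.ofList (List.zipWith
    (fun c ent =>
      match ent with
      | none => c
      | some (idx, k) => PySem.List.pyGetD alph.toList (PySem.Int.mod (idx + shift + k * step) n) c)
    text.toList table)

-- ===== PRECONDITION & SPEC =====
def Spec_caesar_plus_shift (text : String) (shift : Int) (alph : String) (out : String) : Prop := out = caesar_plus_shift_alt text shift alph
instance (text : String) (shift : Int) (alph : String) (out : String) : Decidable (Spec_caesar_plus_shift text shift alph out) := by unfold Spec_caesar_plus_shift; infer_instance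

-- ===== CLAIM (what is proved, stated in full; the proofs are below) =====
def Claim_equal_caesar_plus_shift : Prop := ∀ (text : String) (shift : Int) (alph : String), Dom_caesar_plus_shift text shift alph → Spec_caesar_plus_shift text shift alph (caesar_plus_shift text shift alph)

-- ===== LEMMAS AND PROOFS =====

-- the dict fold keeps existing bindings and otherwise records the first index (offset by s) in xs
theorem pvPos_go (xs : List Char) (c : Char) : ∀ (s : Int) (d : PySem.Dict Char Int),
    (((PySem.List.enumerate xs s).foldl
      (fun d p => if d.contains p.2 then d else d.insert p.2 p.1) d).get? c) =
      match d.get? c with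
      | some v => some v
      | none => (PySem.List.index? xs c).map (fun n => s + (n : Int)) := by
  induction xs with
  | nil =>
    intro s d
    simp [PySem.List.enumerate_nil, PySem.List.index?]
    cases d.get? c <;> simp
  | cons x xs ih =>
    intro s d
    rw [PySem.List.enumerate_cons]
    simp only [List.foldl_cons]
    rw [ih]
    by_cases hxc : x = c
    · subst hxc
      rw [PySem.List.index?_cons_self]
      by_cases hc : d.contains x = true
      · simp only [hc, if_true]
        have hs : (d.get? x).isSome := by rw [← PySem.Dict.contains_eq_isSome_get?]; exact hc
        cases h : d.get? x with
        | none => rw [h] at hs; simp at hs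
        | some v => simp
      · simp only [hc, Bool.false_eq_true, if_false]
        have hnone : d.get? x = none := by
          cases h : d.get? x with
          | none => rfl
          | some v =>
            exfalso; apply hc
            rw [PySem.Dict.contains_eq_isSome_get?, h]; rfl
        simp [PySem.Dict.get?_insert_self, hnone]
    · rw [PySem.List.index?_cons_of_ne xs hxc]
      by_cases hc : d.contains x = true
      · simp only [hc, if_true]
        cases h : d.get? c with
        | none =>
          cases hi : PySem.List.index? xs c <;> simp
          ring_nf
        | some v => simp
      · simp only [hc, Bool.false_eq_true, if_false]
        rw [PySem.Dict.get?_insert_of_ne d s (Ne.symm hxc)]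
        cases h : d.get? c with
        | none =>
          cases hi : PySem.List.index? xs c <;> simp
          ring_nf
        | some v => simp

theorem pvPos_get (alph : List Char) (c : Char) :
    (pvPos alph).get? c = (PySem.List.index? alph c).map (fun n => (n : Int)) := by
  unfold pvPos
  rw [pvPos_go]
  simp [PySem.Dict.get?_empty]

-- main loop correspondence: A's accumulator i equals k * (1 + shift % 9)
theorem pvMain (alph : List Char) (shift : Int) (ts : List Char) : ∀ (k : Int),
    pvAGo alph shift ts (k * (1 + PySem.Int.mod shift 9)) =
      List.zipWith
        (fun c ent =>
          match ent with
          | none => c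
          | some (idx, k) =>
              PySem.List.pyGetD alph
                (PySem.Int.mod (idx + shift + k * (1 + PySem.Int.mod shift 9)) (alph.length : Int)) c)
        ts (pvTable (pvPos alph) ts k) := by
  induction ts with
  | nil => intro k; simp [pvAGo, pvTable]
  | cons c rest ih =>
    intro k
    cases hi : PySem.List.index? alph c with
    | some n =>
      have hmem : c ∈ alph := (PySem.List.index?_isSome_iff alph c).mp (by rw [hi]; rfl)
      have hc : alph.contains c = true := by simpa using hmem
      rw [PySem.List.index?_eq_idxOf?] at hi
      simp [pvAGo, hmem, pvTable, pvPos_get, hi]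
      rw [show k * (1 + shift % 9) + (1 + shift % 9) = (k + 1) * (1 + shift % 9) from by ring]
      simpa using ih (k + 1)
    | none =>
      have hnm : c ∉ alph := (PySem.List.index?_eq_none_iff alph c).mp hi
      have hc : alph.contains c = false := by simpa using hnm
      rw [PySem.List.index?_eq_idxOf?] at hi
      simp [pvAGo, hnm, pvTable, pvPos_get, hi]
      simpa using ih k

-- ===== VERDICT (by name: the statement is the Claim_ definition above) =====
theorem caesar_plus_shift_spec : Claim_equal_caesar_plus_shift := by
  intro text shift alph _
  unfold Spec_caesar_plus_shift caesar_plus_shift caesar_plus_shift_alt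
  have h := pvMain alph.toList shift text.toList 0
  rw [zero_mul] at h
  rw [h]
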